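-- pv_equiv track=rewrite | github.com/kaiying-tey/Algorithms-Data-Structures | Non-Comparison Sorts/same_anagrams.py | words_with_anagrams
-- ===== SOURCE A (Python) =====
-- def counting_sort_str(a_string):
--     # initialise count array
--     count_array = [0] * (26)
--     # update count array with frequency
--     for char in a_string:
--         position = ord(char) - 97
--         count_array[position] = count_array[position] + 1
--     # generate a sorted string
--     new_string = ""
--     for i in range(len(count_array)):
--         frequency = count_array[i]
--         for _ in range(frequency):
--             new_string += chr(i + 97)
--     return new_string
--
-- def radix_sort_str(a_list):
--     # Find maximum length of word in tuple
--     max_length = 0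
--     for tuples in a_list:
--         if len(tuples[0]) > max_length:
--             max_length = len(tuples[0])
--
--     total_col = 27  # a-z + an additional char
--     column = max_length - 1
--
--     while column >= 0:
--         # initialise count array
--         count_array = [None] * (total_col + 1)
--         for i in range(len(count_array)):
--             count_array[i] = []
--         # update count_array based on ASCII
--         for i in range(len(a_list)):
--             word = a_list[i][0]
--             if column >= len(word): # word has no char at that column
--                 index = 0              # taken as special char
--             else:
--                 index = ord(word[column]) - 96
--             count_array[index].append((word, a_list[i][1]))
--         # update the list to sorted one
--         position = 0
--         for i in range(len(count_array)):
--             frequency = len(count_array[i])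
--             for j in range(frequency):
--                 a_list[position] = count_array[i][j]
--                 position += 1
--         # from right to left
--         column -= 1
--
--     return a_list
--
-- def words_with_anagrams(list1, list2):
--     # sort every word to anagram in list1 and mark down index - O(L1M1)
--     sorted_list1 = []
--     for i in range(len(list1)):
--         sorted_str = counting_sort_str(list1[i])
--         sorted_list1.append((sorted_str, i))
--     # sort every word to anagram in list2 and mark down index - O(L2M2)
--     sorted_list2 = []
--     for j in range(len(list2)):
--         sorted_str = counting_sort_str(list2[j])
--         sorted_list2.append((sorted_str, j))
--     # sort both lists
--     sorted_list1 = radix_sort_str(sorted_list1)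
--     sorted_list2 = radix_sort_str(sorted_list2)
--
--     res = []
--     last_found = ""    # anagram found in previous iteration
--     i = 0     # pointer in list1
--     j = 0     # pointer in list2
--     while i < len(list1):
--         word = sorted_list1[i][0]
--         if word == last_found:   # anagram already found previously
--             res.append(sorted_list1[i])
--             i += 1
--         # continue from where last iteration stopped
--         elif j < len(list2) and word > sorted_list2[j][0]:    # pointed word in list1 greater
--             j += 1
--         elif j < len(list2) and word == sorted_list2[j][0]:
--             res.append(sorted_list1[i])
--             last_found = word
--             j += 1
--             i += 1
--         else:
--             i += 1
--     # Get the strings based on index stored in res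
--     for i in range(len(res)):
--         res[i] = list1[res[i][1]]
--
--     return res
-- ===== SOURCE B (Python) =====
-- def counting_sort_str(a_string):
--     # same 26-slot counting key as the original module helper
--     count_array = [0] * (26)
--     for char in a_string:
--         position = ord(char) - 97
--         count_array[position] = count_array[position] + 1
--     new_string = ""
--     for i in range(len(count_array)):
--         frequency = count_array[i]
--         for _ in range(frequency):
--             new_string += chr(i + 97)
--     return new_string
--
-- def words_with_anagrams(list1, list2):
--     keys2 = set()
--     for w in list2:
--         keys2.add(counting_sort_str(w))
--     matched = []
--     for i, w in enumerate(list1):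
--         k = counting_sort_str(w)
--         if k in keys2:
--             matched.append((k, i))
--     matched.sort(key=lambda p: p[0])
--     return [list1[i] for _, i in matched]
-- ===== Notes on version B (the rewrite author's own statement) =====
-- stated objective: simpler
-- what changed: B keeps the counting-based anagram key but replaces A's two radix sorts and two-pointer merge with a set of list2 keys, one filtered pass over list1, and a single stable sort of the matched (key, index) pairs.
-- intended difference: On inputs where list1 contains the empty string but list2 does not, A returns those empty strings (last_found is initialised to "" so they count as 'already found'), while B omits them because list2 holds no anagram of "" — the intended behaviour. — e.g. on words_with_anagrams([""], []): A returns [""], B returns []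
import Mathlib
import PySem

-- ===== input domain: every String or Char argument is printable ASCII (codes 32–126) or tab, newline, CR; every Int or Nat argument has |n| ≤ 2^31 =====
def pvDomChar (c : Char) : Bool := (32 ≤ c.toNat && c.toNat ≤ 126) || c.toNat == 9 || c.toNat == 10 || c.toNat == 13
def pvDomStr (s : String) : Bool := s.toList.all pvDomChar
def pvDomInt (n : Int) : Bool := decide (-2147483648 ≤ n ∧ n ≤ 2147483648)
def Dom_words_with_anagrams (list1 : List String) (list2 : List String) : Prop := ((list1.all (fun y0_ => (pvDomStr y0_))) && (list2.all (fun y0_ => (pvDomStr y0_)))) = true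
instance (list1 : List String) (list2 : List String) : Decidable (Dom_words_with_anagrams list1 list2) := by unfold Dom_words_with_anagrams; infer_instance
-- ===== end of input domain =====

-- B replaces A's second radix sort and two-pointer merge by a hash-set membership test plus ONE stable
-- sort of the matched pairs (same value everywhere except A's empty-string accident, stated in D_ below).

-- ===== PORT A =====
-- counting_sort_str: the 26-slot count array, with Python's indexing (a negative
-- position wraps from the end — exact via PySem.List.pyGetD/pySetD, whose defaults
-- are only reached where CPython raises IndexError, excluded by Pre_).
def pvCountArr (cs : List Char) : List Int :=
  cs.foldl (fun ca c =>
    let position : Int := (c.toNat : Int) - 97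
    PySem.List.pySetD ca position (PySem.List.pyGetD ca position 0 + 1))
    (List.replicate 26 0)

-- '' built by appending chr(i+97) frequency times, for i in range(len(count_array))
def countingSortStr (cs : List Char) : List Char :=
  let count := pvCountArr cs
  (List.range count.length).foldl (fun ns (i : Nat) =>
    let frequency := PySem.List.pyGetD count (i : Int) 0
    ns ++ List.replicate frequency.toNat (Char.ofNat (i + 97))) []

-- the two 'mark down index' loops of A (enumerate = range(len(...)) with indexing)
def pvBuildPairs (ws : List String) : List (List Char × Int) :=
  (PySem.List.enumerate ws).foldl
    (fun acc p => acc ++ [(countingSortStr p.2.toList, p.1)]) []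

-- max_length loop of radix_sort_str
def pvMaxLen (l : List (List Char × Int)) : Nat :=
  l.foldl (fun m p => if p.1.length > m then p.1.length else m) 0

-- bucket index at a column: 0 past the end of the word, else ord - 96
def pvBucketIdx (w : List Char) (c : Nat) : Nat :=
  if w.length ≤ c then 0 else (w.getD c 'a').toNat - 96

-- one radix pass: distribute into the 28 buckets, then read them back in order
def pvRadixPass (l : List (List Char × Int)) (c : Nat) : List (List Char × Int) :=
  let buckets := l.foldl (fun bs p => bs.modify (pvBucketIdx p.1 c) (fun b => b ++ [p]))
    (List.replicate 28 [])
  buckets.foldl (fun acc b => acc ++ b) []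

-- the while-loop over columns max_length-1, …, 0
def pvRadixLoop (l : List (List Char × Int)) : Nat → List (List Char × Int)
  | 0 => l
  | c + 1 => pvRadixLoop (pvRadixPass l c) c

def pvRadixSortStr (l : List (List Char × Int)) : List (List Char × Int) :=
  pvRadixLoop l (pvMaxLen l)

-- the two-pointer merge (pointers i, j become the two list suffixes; each loop
-- iteration advances i or j, so fuel = |us| + |vs| only makes the recursion
-- structural — it is never exhausted)
def pvMergeGo : Nat → List (List Char × Int) → List (List Char × Int) → List Char → List (List Char × Int)
  | _, [], _, _ => []
  | 0, _ :: _, _, _ => []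
  | fuel + 1, p :: us, vs, last =>
    if p.1 = last then
      p :: pvMergeGo fuel us vs last
    else
      match vs with
      | q :: vs' =>
        if q.1 < p.1 then pvMergeGo fuel (p :: us) vs' last
        else if p.1 = q.1 then p :: pvMergeGo fuel us vs' p.1
        else pvMergeGo fuel us (q :: vs') last
      | [] => pvMergeGo fuel us [] last

def pvMergeLoop (us vs : List (List Char × Int)) (last : List Char) : List (List Char × Int) :=
  pvMergeGo (us.length + vs.length) us vs last

def words_with_anagrams (list1 : List String) (list2 : List String) : List String :=
  let sorted_list1 := pvBuildPairs list1
  let sorted_list2 := pvBuildPairs list2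
  let s1 := pvRadixSortStr sorted_list1
  let s2 := pvRadixSortStr sorted_list2
  let res := pvMergeLoop s1 s2 []
  res.map (fun p => PySem.List.pyGetD list1 p.2 "")

-- ===== PORT B =====
def words_with_anagrams_alt (list1 : List String) (list2 : List String) : List String :=
  let keys2 : PySem.Set (List Char) :=
    list2.foldl (fun s w => PySem.Set.add s (countingSortStr w.toList)) PySem.Set.empty
  let matched := (PySem.List.enumerate list1).foldl (fun acc p =>
      let k := countingSortStr p.2.toList
      if PySem.Set.contains keys2 k then acc ++ [(k, p.1)] else acc) []
  let sortedm := PySem.List.sorted matched (fun p => p.1)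
  sortedm.map (fun p => PySem.List.pyGetD list1 p.2 "")

-- ===== PRECONDITION & SPEC =====
-- Pre_ excludes exactly the inputs on which A raises IndexError: a character with
-- code < 71 or > 122 in any word (codes 71–96 wrap around to valid negative indices
-- in CPython, so they are admitted and matched exactly).
def Pre_words_with_anagrams (list1 : List String) (list2 : List String) : Prop :=
  ((list1 ++ list2).all (fun w => w.toList.all (fun c => 71 ≤ c.toNat && c.toNat ≤ 122))) = true
instance (list1 : List String) (list2 : List String) : Decidable (Pre_words_with_anagrams list1 list2) := by
  unfold Pre_words_with_anagrams; infer_instance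

def pvWitness_words_with_anagrams : List String × List String := (["abc", "xy"], ["cab"])

-- A initialises last_found to "" so every empty string of list1 is reported as 'anagram
-- already found' even when list2 holds no empty string; B reports an empty string only if
-- list2 contains one, which is the intended meaning of the function.
def D_words_with_anagrams (list1 : List String) (list2 : List String) : Prop :=
  "" ∈ list1 ∧ "" ∉ list2
instance (list1 : List String) (list2 : List String) : Decidable (D_words_with_anagrams list1 list2) := by
  unfold D_words_with_anagrams; infer_instance

def Spec_words_with_anagrams (list1 : List String) (list2 : List String) (out : List String) : Prop :=
  ¬ D_words_with_anagrams list1 list2 → out = words_with_anagrams_alt list1 list2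
instance (list1 : List String) (list2 : List String) (out : List String) : Decidable (Spec_words_with_anagrams list1 list2 out) := by
  unfold Spec_words_with_anagrams; infer_instance

def pvDiffWitness_words_with_anagrams : List String × List String := ([""], [])
def pvDiffWitnessOut_words_with_anagrams : (List String) × (List String) := ([""], [])

-- ===== CLAIM =====
def Claim_unchanged_words_with_anagrams : Prop := ∀ (list1 : List String) (list2 : List String), Dom_words_with_anagrams list1 list2 → Pre_words_with_anagrams list1 list2 → Spec_words_with_anagrams list1 list2 (words_with_anagrams list1 list2)
def Claim_changed_words_with_anagrams : Prop := Dom_words_with_anagrams (pvDiffWitness_words_with_anagrams.1) (pvDiffWitness_words_with_anagrams.2) ∧ Pre_words_with_anagrams (pvDiffWitness_words_with_anagrams.1) (pvDiffWitness_words_with_anagrams.2) ∧ D_words_with_anagrams (pvDiffWitness_words_with_anagrams.1) (pvDiffWitness_words_with_anagrams.2) ∧ words_with_anagrams (pvDiffWitness_words_with_anagrams.1) (pvDiffWitness_words_with_anagrams.2) = pvDiffWitnessOut_words_with_anagrams.1 ∧ words_with_anagrams_alt (pvDiffWitness_words_with_anagrams.1) (pvDiffWitness_words_with_anagrams.2)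 = pvDiffWitnessOut_words_with_anagrams.2 ∧ pvDiffWitnessOut_words_with_anagrams.1 ≠ pvDiffWitnessOut_words_with_anagrams.2
def Claim_exact_words_with_anagrams : Prop := ∀ (list1 : List String) (list2 : List String), Dom_words_with_anagrams list1 list2 → Pre_words_with_anagrams list1 list2 → D_words_with_anagrams list1 list2 → words_with_anagrams list1 list2 ≠ words_with_anagrams_alt list1 list2

-- ===== LEMMAS AND PROOFS =====

-- strict "sort key with tie broken by the (distinct) original index" order
def PairLt (p q : List Char × Int) : Prop :=
  p.1 < q.1 ∨ (p.1 = q.1 ∧ p.2 < q.2)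

-- the order established after the radix passes down to column c
def SuffLt (c : Nat) (p q : List Char × Int) : Prop :=
  p.1.drop c < q.1.drop c ∨ (p.1.drop c = q.1.drop c ∧ p.2 < q.2)

def KeyChars (l : List (List Char × Int)) : Prop :=
  ∀ p ∈ l, ∀ ch ∈ p.1, 97 ≤ ch.toNat ∧ ch.toNat ≤ 122

lemma foldl_pySetD_length (cs : List Char) (ca : List Int) :
    (cs.foldl (fun ca c =>
      let position : Int := (c.toNat : Int) - 97
      PySem.List.pySetD ca position (PySem.List.pyGetD ca position 0 + 1)) ca).length = ca.length := by
  induction cs generalizing ca with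
  | nil => rfl
  | cons c cs ih => simp [ih, PySem.List.length_pySetD]

lemma length_pvCountArr (cs : List Char) : (pvCountArr cs).length = 26 := by
  simpa using foldl_pySetD_length cs (List.replicate 26 0)

lemma countingSortStr_eq_flatMap (cs : List Char) :
    countingSortStr cs = (List.range 26).flatMap
      (fun (i : Nat) => List.replicate (PySem.List.pyGetD (pvCountArr cs) (i : Int) 0).toNat (Char.ofNat (i + 97))) := by
  have h := length_pvCountArr cs
  simp only [countingSortStr, h]
  rw [PySem.List.foldl_append_eq_flatMap]
  simp

lemma countingSortStr_chars (cs : List Char) :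
    ∀ ch ∈ countingSortStr cs, 97 ≤ ch.toNat ∧ ch.toNat ≤ 122 := by
  intro ch hm
  rw [countingSortStr_eq_flatMap] at hm
  obtain ⟨i, hi, hrep⟩ := List.mem_flatMap.mp hm
  have hi26 : i < 26 := List.mem_range.mp hi
  have : ch = Char.ofNat (i + 97) := List.eq_of_mem_replicate hrep
  subst this
  have hv : (i + 97).isValidChar := Or.inl (by omega)
  rw [Char.toNat_ofNat, if_pos hv]
  omega

lemma pvCountStep_eq (ca : List Int) (hlen : ca.length = 26) (c : Char)
    (hc : 71 ≤ c.toNat ∧ c.toNat ≤ 122) :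
    ∃ k : Nat, k < 26 ∧
      (let position : Int := (c.toNat : Int) - 97
       PySem.List.pySetD ca position (PySem.List.pyGetD ca position 0 + 1))
        = ca.set k (ca.getD k 0 + 1) := by
  set position : Int := (c.toNat : Int) - 97 with hpos
  have hidx : ∃ k : Nat, k < 26 ∧ PySem.List.pyIdx? ca.length position = some k := by
    rw [hlen]
    unfold PySem.List.pyIdx?
    by_cases h0 : 0 ≤ position
    · exact ⟨position.toNat, by omega, by rw [if_pos h0, if_pos (by omega)]⟩
    · refine ⟨26 - (-position).toNat, by omega, ?_⟩
      rw [if_neg h0, if_pos (by omega)]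
  obtain ⟨k, hk, hkeq⟩ := hidx
  refine ⟨k, hk, ?_⟩
  show PySem.List.pySetD ca position (PySem.List.pyGetD ca position 0 + 1) = _
  unfold PySem.List.pySetD PySem.List.pySet? PySem.List.pyGetD PySem.List.pyGet?
  rw [hkeq]
  simp [List.getD_eq_getElem?_getD]

lemma foldl_count_ge (cs : List Char) (hc : ∀ c ∈ cs, 71 ≤ c.toNat ∧ c.toNat ≤ 122) :
    ∀ (ca : List Int), ca.length = 26 → ∀ j : Nat, j < 26 →
    ca.getD j 0 ≤ (cs.foldl (fun ca c =>
      let position : Int := (c.toNat : Int) - 97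
      PySem.List.pySetD ca position (PySem.List.pyGetD ca position 0 + 1)) ca).getD j 0 := by
  induction cs with
  | nil => intro ca _ j _; exact le_refl _
  | cons c rest ih =>
    intro ca hlen j hj
    obtain ⟨k, hk, hstep⟩ := pvCountStep_eq ca hlen c (hc c (List.mem_cons_self ..))
    rw [List.foldl_cons, hstep]
    refine le_trans ?_ (ih (fun d hd => hc d (List.mem_cons_of_mem _ hd))
      (ca.set k (ca.getD k 0 + 1)) (by simpa using hlen) j hj)
    by_cases hjk : j = k
    · subst hjk
      have hset : (ca.set j (ca.getD j 0 + 1)).getD j 0 = ca.getD j 0 + 1 := by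
        simp [List.getD_eq_getElem?_getD, (show j < ca.length by omega)]
      rw [hset]
      omega
    · have hset : (ca.set k (ca.getD k 0 + 1)).getD j 0 = ca.getD j 0 := by
        simp [List.getD_eq_getElem?_getD, List.getElem?_set_ne (Ne.symm hjk)]
      rw [hset]

lemma countingSortStr_ne_nil (cs : List Char)
    (hc : ∀ c ∈ cs, 71 ≤ c.toNat ∧ c.toNat ≤ 122) (h : cs ≠ []) :
    countingSortStr cs ≠ [] := by
  cases cs with
  | nil => exact absurd rfl h
  | cons c0 rest =>
    obtain ⟨k0, hk0, hstep⟩ := pvCountStep_eq (List.replicate 26 0) (by simp) c0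
      (hc c0 (List.mem_cons_self ..))
    have hrep : (List.replicate 26 (0:Int)).getD k0 0 = 0 := by
      rw [List.getD_eq_getElem?_getD, List.getElem?_replicate, if_pos hk0, Option.getD_some]
    have hinit : ((List.replicate 26 (0:Int)).set k0 ((List.replicate 26 (0:Int)).getD k0 0 + 1)).getD k0 0 = 1 := by
      rw [List.getD_eq_getElem?_getD, List.getElem?_set_self (by simpa using hk0),
        Option.getD_some, hrep]
      omega
    have hfin : (1:Int) ≤ (pvCountArr (c0 :: rest)).getD k0 0 := by
      unfold pvCountArr
      rw [List.foldl_cons, hstep]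
      calc (1:Int) = _ := hinit.symm
        _ ≤ _ := foldl_count_ge rest (fun d hd => hc d (List.mem_cons_of_mem _ hd)) _
            (by simp) k0 hk0
    intro hout
    rw [countingSortStr_eq_flatMap] at hout
    have hmem : (k0 : Nat) ∈ List.range 26 := List.mem_range.mpr hk0
    have := List.flatMap_eq_nil_iff.mp hout _ hmem
    rw [List.replicate_eq_nil_iff] at this
    rw [PySem.List.pyGetD_natCast] at this
    omega

lemma pvBuildPairs_eq (ws : List String) :
    pvBuildPairs ws = (PySem.List.enumerate ws).map (fun p => (countingSortStr p.2.toList, p.1)) := by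
  unfold pvBuildPairs
  rw [PySem.List.foldl_append_singleton_eq_map
    (f := fun p : Int × String => (countingSortStr p.2.toList, p.1)) (PySem.List.enumerate ws) []]
  rfl

lemma pvBuildPairs_snd_pairwise (ws : List String) :
    (pvBuildPairs ws).Pairwise (fun p q => p.2 < q.2) := by
  rw [pvBuildPairs_eq, List.pairwise_map]
  exact PySem.List.pairwise_lt_enumerate ws 0

lemma pvBuildPairs_keyChars (ws : List String) : KeyChars (pvBuildPairs ws) := by
  intro p hp ch hch
  rw [pvBuildPairs_eq] at hp
  obtain ⟨e, -, rfl⟩ := List.mem_map.mp hp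
  exact countingSortStr_chars _ ch hch

lemma map_fst_pvBuildPairs (ws : List String) :
    (pvBuildPairs ws).map (fun p => p.1) = ws.map (fun w => countingSortStr w.toList) := by
  rw [pvBuildPairs_eq, List.map_map]
  have := PySem.List.map_snd_enumerate ws 0
  calc ((PySem.List.enumerate ws).map fun p => countingSortStr p.2.toList)
      = ((PySem.List.enumerate ws).map (fun p : Int × String => p.2)).map
          (fun w => countingSortStr w.toList) := by rw [List.map_map]; rfl
    _ = ws.map (fun w => countingSortStr w.toList) := by rw [this]

-- bucket distribution: the foldl over modify equals per-bucket filters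
lemma map_getD_range {α : Type} (B : List (List α)) :
    (List.range B.length).map (fun i => B.getD i []) = B := by
  apply List.ext_getElem (by simp)
  intro i h1 h2
  simp [List.getD_eq_getElem?_getD, List.getElem?_eq_getElem h2]

lemma foldl_modify_buckets {α : Type} (f : α → Nat) (l : List α) (B : List (List α))
    (h : ∀ x ∈ l, f x < B.length) :
    l.foldl (fun bs x => bs.modify (f x) (fun b => b ++ [x])) B
      = (List.range B.length).map (fun i => B.getD i [] ++ l.filter (fun x => f x == i)) := by
  induction l generalizing B with
  | nil => simpa using (map_getD_range B).symm
  | cons x t ih =>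
    have hx : f x < B.length := h x (List.mem_cons_self ..)
    have hlen : (B.modify (f x) (fun b => b ++ [x])).length = B.length := by
      simp
    rw [List.foldl_cons, ih _ (by intro y hy; rw [hlen]; exact h y (List.mem_cons_of_mem _ hy)), hlen]
    apply List.map_congr_left
    intro i hi
    have hi' : i < B.length := List.mem_range.mp hi
    have hgetB : ∀ (C : List (List α)) (hC : i < C.length), C.getD i [] = C[i] := by
      intro C hC; simp [List.getD_eq_getElem?_getD, List.getElem?_eq_getElem hC]
    rw [hgetB _ (by omega), hgetB _ hi', List.getElem_modify]
    by_cases hfx : f x = i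
    · simp [hfx, List.append_assoc]
    · simp [hfx]

lemma pvRadixPass_eq (l : List (List Char × Int)) (c : Nat) (h : ∀ p ∈ l, pvBucketIdx p.1 c < 28) :
    pvRadixPass l c
      = ((List.range 28).map (fun i => l.filter (fun p => pvBucketIdx p.1 c == i))).flatten := by
  unfold pvRadixPass
  rw [foldl_modify_buckets (fun p => pvBucketIdx p.1 c) l (List.replicate 28 []) (by simpa using h)]
  rw [PySem.List.foldl_append_eq_flatten]
  simp only [List.length_replicate]
  refine congrArg List.flatten (List.map_congr_left ?_)
  intro i hi
  have hi28 : i < 28 := List.mem_range.mp hi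
  have : (List.replicate 28 ([] : List (List Char × Int))).getD i [] = [] := by
    interval_cases i <;> rfl
  rw [this, List.nil_append]

lemma flatten_filters_perm {α : Type} (f : α → Nat) (l : List α) (n : Nat)
    (h : ∀ x ∈ l, f x < n) :
    (((List.range n).map (fun i => l.filter (fun x => f x == i))).flatten).Perm l := by
  induction l with
  | nil => simp
  | cons x t ih =>
    have hx : f x ∈ List.range n := List.mem_range.mpr (h x (List.mem_cons_self ..))
    have step : (((List.range n).map (fun i => (x :: t).filter (fun y => f y == i))).flatten).Perm
        (x :: ((List.range n).map (fun i => t.filter (fun y => f y == i))).flatten) := by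
      clear ih h
      generalize List.nodup_range (n := n) = hnd
      generalize List.range n = is at hx hnd
      induction is with
      | nil => cases hx
      | cons i is' ih2 =>
        by_cases hfx : f x = i
        · have hnotin : ∀ j ∈ is', (x :: t).filter (fun y => f y == j) = t.filter (fun y => f y == j) := by
            intro j hj
            have : f x ≠ j := by
              rintro rfl; exact (List.nodup_cons.mp hnd).1 (hfx ▸ hj)
            simp [this]
          simp only [List.map_cons, List.flatten_cons]
          rw [List.filter_cons, if_pos (by simpa using hfx), List.map_congr_left hnotin]
          simp
        · have hx' : f x ∈ is' := by
            rcases List.mem_cons.mp hx with h1 | h1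
            · exact absurd h1 hfx
            · exact h1
          have ih3 := ih2 hx' (List.nodup_cons.mp hnd).2
          simp only [List.map_cons, List.flatten_cons]
          rw [List.filter_cons, if_neg (by simpa using hfx)]
          exact (List.Perm.append_left _ ih3).trans List.perm_middle
    refine step.trans ?_
    exact (ih (fun y hy => h y (List.mem_cons_of_mem _ hy))).cons x

lemma pvBucketIdx_lt (w : List Char) (c : Nat)
    (hb : ∀ ch ∈ w, 97 ≤ ch.toNat ∧ ch.toNat ≤ 122) : pvBucketIdx w c < 28 := by
  unfold pvBucketIdx
  split
  · omega
  · rename_i hc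
    have hm : w.getD c 'a' ∈ w := by
      rw [List.getD_eq_getElem?_getD, List.getElem?_eq_getElem (by omega)]
      exact List.getElem_mem _
    have := hb _ hm
    omega

lemma pvRadixPass_perm (l : List (List Char × Int)) (c : Nat) (hb : KeyChars l) :
    (pvRadixPass l c).Perm l := by
  have h28 : ∀ p ∈ l, pvBucketIdx p.1 c < 28 := fun p hp => pvBucketIdx_lt _ _ (hb p hp)
  rw [pvRadixPass_eq l c h28]
  exact flatten_filters_perm _ l 28 h28

lemma drop_cons_getD (w : List Char) (c : Nat) (hc : ¬ w.length ≤ c) :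
    w.drop c = w.getD c 'a' :: w.drop (c + 1) := by
  rw [List.getD_eq_getElem?_getD, List.getElem?_eq_getElem (by omega)]
  exact List.drop_eq_getElem_cons (by omega)

lemma getD_mem_of_lt (w : List Char) (c : Nat) (hc : ¬ w.length ≤ c) : w.getD c 'a' ∈ w := by
  rw [List.getD_eq_getElem?_getD, List.getElem?_eq_getElem (by omega)]
  exact List.getElem_mem _

lemma suffLt_of_eq_idx {a b : List Char × Int} {c : Nat}
    (ha : ∀ ch ∈ a.1, 97 ≤ ch.toNat ∧ ch.toNat ≤ 122)
    (hb : ∀ ch ∈ b.1, 97 ≤ ch.toNat ∧ ch.toNat ≤ 122)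
    (hidx : pvBucketIdx a.1 c = pvBucketIdx b.1 c)
    (h : SuffLt (c + 1) a b) : SuffLt c a b := by
  unfold pvBucketIdx at hidx
  by_cases hca : a.1.length ≤ c <;> by_cases hcb : b.1.length ≤ c
  · unfold SuffLt at h ⊢
    rw [List.drop_eq_nil_of_le hca, List.drop_eq_nil_of_le hcb]
    rw [List.drop_eq_nil_of_le (le_trans hca (by omega)),
      List.drop_eq_nil_of_le (le_trans hcb (by omega))] at h
    rcases h with h | h
    · exact absurd h (lt_irrefl _)
    · exact Or.inr ⟨rfl, h.2⟩
  · exfalso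
    rw [if_pos hca, if_neg hcb] at hidx
    have := hb _ (getD_mem_of_lt b.1 c hcb)
    omega
  · exfalso
    rw [if_neg hca, if_pos hcb] at hidx
    have := ha _ (getD_mem_of_lt a.1 c hca)
    omega
  · rw [if_neg hca, if_neg hcb] at hidx
    have h97a := ha _ (getD_mem_of_lt a.1 c hca)
    have h97b := hb _ (getD_mem_of_lt b.1 c hcb)
    have hch : a.1.getD c 'a' = b.1.getD c 'a' := by
      apply Char.ext
      apply UInt32.toNat_inj.mp
      show (a.1.getD c 'a').toNat = (b.1.getD c 'a').toNat
      omega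
    unfold SuffLt at h ⊢
    rw [drop_cons_getD a.1 c hca, drop_cons_getD b.1 c hcb, hch]
    rcases h with h | h
    · exact Or.inl (List.cons_lt_cons_iff.mpr (Or.inr ⟨rfl, h⟩))
    · exact Or.inr ⟨by rw [h.1], h.2⟩

lemma suffLt_of_lt_idx {a b : List Char × Int} {c : Nat}
    (ha : ∀ ch ∈ a.1, 97 ≤ ch.toNat ∧ ch.toNat ≤ 122)
    (hb : ∀ ch ∈ b.1, 97 ≤ ch.toNat ∧ ch.toNat ≤ 122)
    (hidx : pvBucketIdx a.1 c < pvBucketIdx b.1 c) : SuffLt c a b := by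
  unfold pvBucketIdx at hidx
  by_cases hcb : b.1.length ≤ c
  · rw [if_pos hcb] at hidx
    omega
  · rw [if_neg hcb] at hidx
    by_cases hca : a.1.length ≤ c
    · refine Or.inl ?_
      rw [List.drop_eq_nil_of_le hca, drop_cons_getD b.1 c hcb]
      exact List.nil_lt_cons _ _
    · rw [if_neg hca] at hidx
      have h97a := ha _ (getD_mem_of_lt a.1 c hca)
      have h97b := hb _ (getD_mem_of_lt b.1 c hcb)
      refine Or.inl ?_
      rw [drop_cons_getD a.1 c hca, drop_cons_getD b.1 c hcb]
      exact List.cons_lt_cons_iff.mpr (Or.inl (Char.lt_def.mpr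
        (show (a.1.getD c 'a').toNat < (b.1.getD c 'a').toNat by omega)))

lemma pvRadixPass_pairwise (l : List (List Char × Int)) (c : Nat) (hb : KeyChars l)
    (hp : l.Pairwise (SuffLt (c + 1))) :
    (pvRadixPass l c).Pairwise (SuffLt c) := by
  have h28 : ∀ p ∈ l, pvBucketIdx p.1 c < 28 := fun p hp => pvBucketIdx_lt _ _ (hb p hp)
  rw [pvRadixPass_eq l c h28, List.pairwise_flatten]
  constructor
  · intro bl hbl
    obtain ⟨i, hi, rfl⟩ := List.mem_map.mp hbl
    refine List.Pairwise.imp_of_mem ?_ (hp.filter _)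
    intro a b hma hmb hab
    have h1 := List.of_mem_filter hma
    have h2 := List.of_mem_filter hmb
    exact suffLt_of_eq_idx (hb a (List.mem_of_mem_filter hma)) (hb b (List.mem_of_mem_filter hmb))
      (by rw [beq_iff_eq.mp h1, beq_iff_eq.mp h2]) hab
  · rw [List.pairwise_map]
    refine List.Pairwise.imp_of_mem ?_ List.pairwise_lt_range
    intro i j hi hj hij a hma b hmb
    have h1 := List.of_mem_filter hma
    have h2 := List.of_mem_filter hmb
    exact suffLt_of_lt_idx (hb a (List.mem_of_mem_filter hma)) (hb b (List.mem_of_mem_filter hmb))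
      (by rw [beq_iff_eq.mp h1, beq_iff_eq.mp h2]; exact hij)

lemma pvRadixLoop_spec (m : Nat) (l : List (List Char × Int)) (hb : KeyChars l)
    (hp : l.Pairwise (SuffLt m)) :
    (pvRadixLoop l m).Perm l ∧ (pvRadixLoop l m).Pairwise (SuffLt 0) := by
  induction m generalizing l with
  | zero => exact ⟨List.Perm.refl l, hp⟩
  | succ m ih =>
    have hperm := pvRadixPass_perm l m hb
    have hb' : KeyChars (pvRadixPass l m) := fun p hp' => hb p (hperm.mem_iff.mp hp')
    have hpw := pvRadixPass_pairwise l m hb hp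
    obtain ⟨P1, P2⟩ := ih (pvRadixPass l m) hb' hpw
    exact ⟨P1.trans hperm, P2⟩

lemma pvMaxLen_ge (l : List (List Char × Int)) : ∀ p ∈ l, p.1.length ≤ pvMaxLen l := by
  have hfold := PySem.List.foldl_congr_mem (l := l) (init := (0 : Nat))
    (f := fun m (p : List Char × Int) => if p.1.length > m then p.1.length else m)
    (g := fun m p => max m p.1.length)
    (by intro acc x hx
        simp only []
        by_cases h : x.1.length > acc
        · rw [if_pos h]; exact (Nat.max_eq_right (le_of_lt h)).symm
        · rw [if_neg h]; exact (Nat.max_eq_left (by omega)).symm)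
  unfold pvMaxLen
  rw [hfold]
  exact (PySem.List.le_foldl_max_nat l (fun p => p.1.length) 0).2

lemma pairLt_fst_le {p q : List Char × Int} (h : PairLt p q) : p.1 ≤ q.1 := by
  rcases h with h | h
  · exact le_of_lt h
  · exact le_of_eq h.1

lemma pairLt_antisymm (a b : List Char × Int) (h1 : PairLt a b) (h2 : PairLt b a) : a = b := by
  exfalso
  rcases h1 with h1 | h1 <;> rcases h2 with h2 | h2
  · exact lt_asymm h1 h2
  · exact lt_irrefl _ (h2.1 ▸ h1)
  · exact lt_irrefl _ (h1.1 ▸ h2)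
  · omega

lemma insertBy_pairLt (x : List Char × Int) (ys : List (List Char × Int))
    (hys : ys.Pairwise PairLt) (hsnd : ∀ y ∈ ys, y.2 < x.2) :
    (PySem.List.insertBy (fun a b => decide (a.1 < b.1)) x ys).Pairwise PairLt := by
  induction ys with
  | nil => simp [PySem.List.insertBy]
  | cons y ys ih =>
    obtain ⟨hy, hys'⟩ := List.pairwise_cons.mp hys
    simp only [PySem.List.insertBy]
    split
    · rename_i hd
      have hlt : x.1 < y.1 := of_decide_eq_true hd
      refine List.pairwise_cons.mpr ⟨?_, hys⟩
      intro z hz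
      rcases List.mem_cons.mp hz with rfl | hz
      · exact Or.inl hlt
      · exact Or.inl (lt_of_lt_of_le hlt (pairLt_fst_le (hy z hz)))
    · rename_i hd
      have hnlt : ¬ x.1 < y.1 := by simpa using hd
      refine List.pairwise_cons.mpr ⟨?_, ih hys' (fun z hz => hsnd z (List.mem_cons_of_mem _ hz))⟩
      intro z hz
      rcases (PySem.List.mem_insertBy _ _ _ _).mp hz with rfl | hz
      · rcases lt_or_eq_of_le (le_of_not_gt hnlt) with h | h
        · exact Or.inl h
        · exact Or.inr ⟨h, hsnd y (List.mem_cons_self ..)⟩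
      · exact hy z hz

lemma foldl_insertBy_pairLt (t : List (List Char × Int)) :
    ∀ acc, acc.Pairwise PairLt → (∀ y ∈ acc, ∀ x ∈ t, y.2 < x.2) →
    t.Pairwise (fun p q => p.2 < q.2) →
    (t.foldl (fun acc x => PySem.List.insertBy (fun a b => decide (a.1 < b.1)) x acc) acc).Pairwise PairLt := by
  induction t with
  | nil => intro acc h _ _; exact h
  | cons x t ih =>
    intro acc hacc hcross hp
    obtain ⟨hx, hp'⟩ := List.pairwise_cons.mp hp
    rw [List.foldl_cons]
    apply ih
    · exact insertBy_pairLt x acc hacc (fun y hy => hcross y hy x (List.mem_cons_self ..))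
    · intro y hy z hz
      rcases (PySem.List.mem_insertBy _ _ _ _).mp hy with rfl | hy
      · exact hx z hz
      · exact hcross y hy z (List.mem_cons_of_mem _ hz)
    · exact hp'

lemma sorted_pairLt (l : List (List Char × Int)) (hp : l.Pairwise (fun p q => p.2 < q.2)) :
    (PySem.List.sorted l (fun p => p.1)).Pairwise PairLt := by
  rw [PySem.List.sorted_eq_foldl_insertBy]
  exact foldl_insertBy_pairLt l [] (by simp) (by simp) hp

lemma pvRadixSortStr_eq_sorted (l : List (List Char × Int)) (hb : KeyChars l)
    (hp : l.Pairwise (fun p q => p.2 < q.2)) :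
    pvRadixSortStr l = PySem.List.sorted l (fun p => p.1) := by
  have hlen := pvMaxLen_ge l
  have hinit : l.Pairwise (SuffLt (pvMaxLen l)) := by
    refine List.Pairwise.imp_of_mem ?_ hp
    intro a b ha hb' h
    exact Or.inr ⟨by rw [List.drop_eq_nil_of_le (hlen a ha), List.drop_eq_nil_of_le (hlen b hb')], h⟩
  obtain ⟨P, W⟩ := pvRadixLoop_spec (pvMaxLen l) l hb hinit
  have W0 : (pvRadixLoop l (pvMaxLen l)).Pairwise PairLt := W
  refine List.Perm.eq_of_pairwise (fun a b _ _ h1 h2 => pairLt_antisymm a b h1 h2) ?_ ?_ ?_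
  · exact W0
  · exact sorted_pairLt l hp
  · exact P.trans (PySem.List.sorted_perm l (fun p => p.1) false).symm

lemma pvMergeGo_eq_filter (fuel : Nat) (us vs : List (List Char × Int)) (last : List Char)
    (hf : us.length + vs.length ≤ fuel)
    (hu : us.Pairwise (fun p q => ¬ q.1 < p.1)) (hv : vs.Pairwise (fun p q => ¬ q.1 < p.1))
    (hl : ∀ r ∈ us, ¬ r.1 < last) :
    pvMergeGo fuel us vs last
      = us.filter (fun p => decide (p.1 = last ∨ p.1 ∈ vs.map (fun q => q.1))) := by
  induction fuel generalizing us vs last with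
  | zero =>
    cases us with
    | nil => rfl
    | cons p us => simp at hf
  | succ fuel ih =>
    cases us with
    | nil => rfl
    | cons p us =>
      obtain ⟨hpu, hu'⟩ := List.pairwise_cons.mp hu
      simp only [pvMergeGo]
      by_cases h1 : p.1 = last
      · rw [if_pos h1, ih us vs last (by simp at hf ⊢; omega) hu' hv
          (fun r hr => not_lt.mpr (le_trans (not_lt.mp (hl p (List.mem_cons_self ..)))
            (not_lt.mp (hpu r hr))))]
        rw [List.filter_cons, if_pos (by simp [h1])]
      · rw [if_neg h1]
        cases vs with
        | nil =>
          dsimp only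
          rw [ih us [] last (by simp at hf ⊢; omega) hu' (by simp)
            (fun r hr => hl r (List.mem_cons_of_mem _ hr))]
          rw [List.filter_cons, if_neg (by simp [h1])]
        | cons q vs' =>
          dsimp only
          obtain ⟨hqv, hv'⟩ := List.pairwise_cons.mp hv
          by_cases h2 : q.1 < p.1
          · rw [if_pos h2, ih (p :: us) vs' last (by simp at hf ⊢; omega) hu hv' hl]
            refine (List.filter_congr ?_).symm
            intro r hr
            have hpr : p.1 ≤ r.1 := by
              rcases List.mem_cons.mp hr with rfl | hr
              · exact le_refl _
              · exact not_lt.mp (hpu r hr)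
            have hrq : r.1 ≠ q.1 := ne_of_gt (lt_of_lt_of_le h2 hpr)
            simp only [List.map_cons, List.mem_cons, decide_eq_decide]
            tauto
          · rw [if_neg h2]
            by_cases h3 : p.1 = q.1
            · rw [if_pos h3, ih us vs' p.1 (by simp at hf ⊢; omega) hu' hv' hpu]
              rw [List.filter_cons, if_pos (by simp [h3])]
              congr 1
              refine List.filter_congr ?_
              intro r hr
              have hlast : last < p.1 :=
                lt_of_le_of_ne (not_lt.mp (hl p (List.mem_cons_self ..))) (fun h => h1 h.symm)
              have hrlast : r.1 ≠ last := ne_of_gt (lt_of_lt_of_le hlast (not_lt.mp (hpu r hr)))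
              simp only [List.map_cons, List.mem_cons, decide_eq_decide]
              rw [h3]
              tauto
            · have h4 : p.1 < q.1 := lt_of_le_of_ne (le_of_not_gt h2) h3
              rw [if_neg h3, ih us (q :: vs') last (by simp at hf ⊢; omega) hu' hv
                (fun r hr => hl r (List.mem_cons_of_mem _ hr))]
              have hcond : ¬ (p.1 = last ∨ p.1 ∈ List.map (fun q => q.1) (q :: vs')) := by
                rintro (h | h)
                · exact h1 h
                · rw [List.map_cons] at h
                  rcases List.mem_cons.mp h with h | h
                  · exact h3 h
                  · obtain ⟨r, hr, hrr⟩ := List.mem_map.mp h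
                    exact absurd (hrr ▸ (not_lt.mp (hqv r hr))) (not_le_of_gt h4)
              have hdec : (decide (p.1 = last ∨ p.1 ∈ List.map (fun q => q.1) (q :: vs'))) = false :=
                decide_eq_false hcond
              rw [List.filter_cons]
              simp only [hdec, Bool.false_eq_true, if_false]

lemma sorted_filter_comm (l : List (List Char × Int)) (pred : (List Char × Int) → Bool)
    (hp : l.Pairwise (fun p q => p.2 < q.2)) :
    PySem.List.sorted (l.filter pred) (fun p => p.1)
      = (PySem.List.sorted l (fun p => p.1)).filter pred := by
  refine List.Perm.eq_of_pairwise (fun a b _ _ h1 h2 => pairLt_antisymm a b h1 h2) ?_ ?_ ?_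
  · exact sorted_pairLt _ (hp.filter pred)
  · exact (sorted_pairLt l hp).filter pred
  · exact (PySem.List.sorted_perm _ _ _).trans ((PySem.List.sorted_perm l _ _).filter pred).symm

lemma pre_prop {l1 l2 : List String} (h : Pre_words_with_anagrams l1 l2) :
    ∀ w ∈ l1 ++ l2, ∀ c ∈ w.toList, 71 ≤ c.toNat ∧ c.toNat ≤ 122 := by
  unfold Pre_words_with_anagrams at h
  intro w hw c hcm
  have h1 := List.all_eq_true.mp h w hw
  have h2 := List.all_eq_true.mp h1 c hcm
  simpa using h2

lemma key_empty : countingSortStr ([] : List Char) = [] := by decide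

lemma toList_eq_nil_iff (w : String) : w.toList = [] ↔ w = "" := by
  constructor
  · intro h
    apply String.ext
    simpa using h
  · rintro rfl
    rfl

lemma sorted_key_pairwise_not_lt (l : List (List Char × Int)) :
    (PySem.List.sorted l (fun p => p.1)).Pairwise (fun p q => ¬ q.1 < p.1) := by
  have h := PySem.List.sorted_pairwise l (fun p : List Char × Int => p.1)
  have he : @PySem.List.sorted (List Char × Int) (List Char) List.instLinearOrder.toLT
      LinearOrder.toDecidableLT l (fun p => p.1) false = PySem.List.sorted l (fun p => p.1) := by
    congr 1
  rw [he] at h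
  exact h.imp (fun hle => not_lt.mpr hle)

lemma words_eq (l1 l2 : List String) :
    words_with_anagrams l1 l2 =
      ((PySem.List.sorted (pvBuildPairs l1) (fun p => p.1)).filter
        (fun p => decide (p.1 = [] ∨ p.1 ∈ l2.map (fun w => countingSortStr w.toList)))).map
        (fun p => PySem.List.pyGetD l1 p.2 "") := by
  unfold words_with_anagrams pvMergeLoop
  simp only []
  rw [pvRadixSortStr_eq_sorted _ (pvBuildPairs_keyChars l1) (pvBuildPairs_snd_pairwise l1),
      pvRadixSortStr_eq_sorted _ (pvBuildPairs_keyChars l2) (pvBuildPairs_snd_pairwise l2)]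
  rw [pvMergeGo_eq_filter _ (PySem.List.sorted (pvBuildPairs l1) (fun p => p.1))
      (PySem.List.sorted (pvBuildPairs l2) (fun p => p.1)) [] (le_refl _)
      (sorted_key_pairwise_not_lt (pvBuildPairs l1))
      (sorted_key_pairwise_not_lt (pvBuildPairs l2))
      (fun r _ => List.not_lt_nil r.1)]
  congr 1
  refine List.filter_congr ?_
  intro p hp
  rw [decide_eq_decide]
  have hperm : ((PySem.List.sorted (pvBuildPairs l2) (fun p => p.1)).map (fun q => q.1)).Perm
      ((pvBuildPairs l2).map (fun q => q.1)) := (PySem.List.sorted_perm _ _ _).map _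
  exact or_congr Iff.rfl (hperm.mem_iff.trans (by rw [map_fst_pvBuildPairs]))

lemma alt_eq (l1 l2 : List String) :
    words_with_anagrams_alt l1 l2 =
      (PySem.List.sorted ((pvBuildPairs l1).filter
        (fun p => decide (p.1 ∈ l2.map (fun w => countingSortStr w.toList)))) (fun p => p.1)).map
        (fun p => PySem.List.pyGetD l1 p.2 "") := by
  unfold words_with_anagrams_alt
  simp only []
  rw [← PySem.Set.update_map_eq_foldl_add, PySem.Set.update_empty]
  rw [PySem.List.foldl_append_if
    (p := fun e : Int × String => PySem.Set.contains
      (PySem.Set.ofList (l2.map (fun w => countingSortStr w.toList))) (countingSortStr e.2.toList))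
    (f := fun e : Int × String => (countingSortStr e.2.toList, e.1))]
  rw [List.nil_append, pvBuildPairs_eq, List.filter_map]
  congr 3
  refine List.filter_congr ?_
  intro e _
  show PySem.Set.contains _ (countingSortStr e.2.toList) = _
  by_cases hm : countingSortStr e.2.toList ∈ l2.map (fun w => countingSortStr w.toList)
  · rw [show ((fun kp : List Char × Int => decide (kp.1 ∈ l2.map (fun w => countingSortStr w.toList))) ∘
        (fun e : Int × String => (countingSortStr e.2.toList, e.1))) e
        = decide (countingSortStr e.2.toList ∈ l2.map (fun w => countingSortStr w.toList)) from rfl,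
      decide_eq_true hm]
    exact (PySem.Set.contains_iff _ _).mpr ((PySem.Set.mem_ofList _ _).mpr hm)
  · rw [show ((fun kp : List Char × Int => decide (kp.1 ∈ l2.map (fun w => countingSortStr w.toList))) ∘
        (fun e : Int × String => (countingSortStr e.2.toList, e.1))) e
        = decide (countingSortStr e.2.toList ∈ l2.map (fun w => countingSortStr w.toList)) from rfl,
      decide_eq_false hm]
    exact Bool.eq_false_iff.mpr
      (fun hcon => hm ((PySem.Set.mem_ofList _ _).mp ((PySem.Set.contains_iff _ _).mp hcon)))

-- ===== VERDICT =====
theorem words_with_anagrams_spec : Claim_unchanged_words_with_anagrams := by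
  intro l1 l2 hdom hpre
  unfold Spec_words_with_anagrams
  intro hnd
  rw [words_eq, alt_eq, sorted_filter_comm _ _ (pvBuildPairs_snd_pairwise l1)]
  congr 1
  refine List.filter_congr ?_
  intro p hp
  rw [decide_eq_decide]
  constructor
  · rintro (hnil | hmem2)
    · have hp1 : p ∈ pvBuildPairs l1 := (PySem.List.sorted_perm _ _ _).mem_iff.mp hp
      rw [pvBuildPairs_eq] at hp1
      obtain ⟨e, he, rfl⟩ := List.mem_map.mp hp1
      obtain ⟨k, hk, rfl⟩ := (PySem.List.mem_enumerate_iff _ _ _).mp he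
      have hw : l1[k] ∈ l1 := List.getElem_mem _
      have hwempty : l1[k] = "" := by
        by_contra hne
        have hchars := pre_prop hpre l1[k] (List.mem_append_left _ hw)
        have hnil' : l1[k].toList ≠ [] := fun hh => hne ((toList_eq_nil_iff _).mp hh)
        exact countingSortStr_ne_nil _ hchars hnil' hnil
      have h2 : "" ∈ l2 := by
        by_contra hnl2
        exact hnd ⟨hwempty ▸ hw, hnl2⟩
      refine List.mem_map.mpr ⟨"", h2, ?_⟩
      rw [show ("" : String).toList = ([] : List Char) from rfl, key_empty, hnil]
    · exact hmem2
  · exact fun h => Or.inr h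

theorem words_with_anagrams_changed : Claim_changed_words_with_anagrams := by
  unfold Claim_changed_words_with_anagrams pvDiffWitness_words_with_anagrams
    pvDiffWitnessOut_words_with_anagrams
  decide
theorem words_with_anagrams_tight : Claim_exact_words_with_anagrams := by
  intro l1 l2 hdom hpre hd
  obtain ⟨h1mem, h2notin⟩ := hd
  rw [words_eq, alt_eq]
  intro heq
  have hA : ("" : String) ∈
      ((PySem.List.sorted (pvBuildPairs l1) (fun p => p.1)).filter
        (fun p => decide (p.1 = [] ∨ p.1 ∈ l2.map (fun w => countingSortStr w.toList)))).map
        (fun p => PySem.List.pyGetD l1 p.2 "") := by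
    obtain ⟨k, hk, hkw⟩ := List.getElem_of_mem h1mem
    have hpair : ((0 : Int) + (k : Int), l1[k]) ∈ PySem.List.enumerate l1 :=
      (PySem.List.mem_enumerate_iff _ _ _).mpr ⟨k, hk, rfl⟩
    have hmem1 : (countingSortStr l1[k].toList, (0 : Int) + (k : Int)) ∈ pvBuildPairs l1 := by
      rw [pvBuildPairs_eq]
      exact List.mem_map.mpr ⟨_, hpair, rfl⟩
    have hmem2 : (countingSortStr l1[k].toList, (0 : Int) + (k : Int)) ∈
        PySem.List.sorted (pvBuildPairs l1) (fun p => p.1) :=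
      (PySem.List.mem_sorted _ _ _ _).mpr hmem1
    have hkey : countingSortStr l1[k].toList = [] := by
      rw [hkw]
      exact key_empty
    refine List.mem_map.mpr ⟨_, List.mem_filter.mpr ⟨hmem2, ?_⟩, ?_⟩
    · exact decide_eq_true (Or.inl hkey)
    · show PySem.List.pyGetD l1 ((0 : Int) + (k : Int)) "" = ""
      rw [zero_add, PySem.List.pyGetD_natCast, List.getD_eq_getElem?_getD,
        List.getElem?_eq_getElem hk, Option.getD_some, hkw]
  rw [heq] at hA
  obtain ⟨p, hp, hpe⟩ := List.mem_map.mp hA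
  have hpf := (PySem.List.mem_sorted _ _ _ _).mp hp
  obtain ⟨hpl, hpd⟩ := List.mem_filter.mp hpf
  have hpmem : p.1 ∈ l2.map (fun w => countingSortStr w.toList) := of_decide_eq_true hpd
  obtain ⟨w, hw2, hkeyw⟩ := List.mem_map.mp hpmem
  have hp1 : p ∈ pvBuildPairs l1 := hpl
  rw [pvBuildPairs_eq] at hp1
  obtain ⟨e, he, rfl⟩ := List.mem_map.mp hp1
  obtain ⟨k, hk, rfl⟩ := (PySem.List.mem_enumerate_iff _ _ _).mp he
  have hpe' : l1[k] = "" := by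
    have h0 : PySem.List.pyGetD l1 (0 + (k : Int)) "" = "" := hpe
    rw [zero_add, PySem.List.pyGetD_natCast, List.getD_eq_getElem?_getD,
      List.getElem?_eq_getElem hk, Option.getD_some] at h0
    exact h0
  have hkeynil : countingSortStr w.toList = [] := by
    rw [hkeyw]
    show countingSortStr l1[k].toList = []
    rw [hpe']
    exact key_empty
  have hwnil : w = "" := by
    by_contra hne
    have hchars := pre_prop hpre w (List.mem_append_right _ hw2)
    exact countingSortStr_ne_nil _ hchars
      (fun hh => hne ((toList_eq_nil_iff _).mp hh)) hkeynil
  exact h2notin (hwnil ▸ hw2)
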